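-- pv_equiv track=rewrite | github.com/stemado/ok_vote | Services/Files/file_writer.py | split_text_by_general_order
-- ===== SOURCE A (Python) =====
-- def split_text_by_general_order(text):
--     # Split text by lines
--     lines = text.split('\n')
--
--     # Initialize a list to hold chunks of text
--     chunks = []
--     # Initialize a temporary string to hold the current chunk of text
--     chunk = ""
--     # Flag to indicate if we are inside a GENERAL ORDER section
--     inside_general_order = False
--
--     for line in lines:
--         # Check if the line is "GENERAL ORDER"
--         if line.strip() == "GENERAL ORDER":
--             if inside_general_order:
--                 # Add the current chunk to the chunks list and start a new chunk
--                 chunks.append(chunk.strip())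
--                 chunk = line + "\n"
--             else:
--                 # Start new chunk with GENERAL ORDER
--                 chunk = line + "\n"
--                 inside_general_order = True
--         else:
--             if inside_general_order:
--                 # Add the line to the chunk
--                 chunk += line + "\n"
--
--     # Add the last chunk if it exists
--     if inside_general_order:
--         chunks.append(chunk.strip())
--
--     return chunks
-- ===== SOURCE B (Python) =====
-- def split_text_by_general_order(text):
--     lines = text.split('\n')
--     marks = [i for i, line in enumerate(lines) if line.strip() == "GENERAL ORDER"]
--     return ['\n'.join(lines[s:e]).strip()
--             for s, e in zip(marks, marks[1:] + [len(lines)])]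
-- ===== Notes on version B (the rewrite author's own statement) =====
-- stated objective: alternative
-- what changed: Replaces the single-pass flag-and-growing-string loop by a two-phase index method: collect the indices of GENERAL ORDER marker lines, then slice the original line list between consecutive marker indices and join/strip each slice.
import Mathlib
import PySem

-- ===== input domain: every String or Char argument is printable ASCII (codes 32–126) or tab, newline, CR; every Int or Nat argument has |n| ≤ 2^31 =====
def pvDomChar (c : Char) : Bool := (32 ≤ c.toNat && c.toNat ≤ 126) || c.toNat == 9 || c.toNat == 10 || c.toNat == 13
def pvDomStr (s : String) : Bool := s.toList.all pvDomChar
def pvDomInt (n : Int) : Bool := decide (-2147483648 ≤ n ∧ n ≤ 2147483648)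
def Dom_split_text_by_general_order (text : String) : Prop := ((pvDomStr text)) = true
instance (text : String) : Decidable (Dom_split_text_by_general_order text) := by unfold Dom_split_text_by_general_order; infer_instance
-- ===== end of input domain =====

-- B replaces A's single-pass flag-and-growing-string loop by a two-phase method (collect marker
-- indices, then slice/join/strip between consecutive indices); same cost, alternative decomposition.

def pvMarker : List Char := "GENERAL ORDER".toList

-- ===== PORT A =====
-- the body of A's for-loop, on the state (chunks, chunk, inside_general_order)
def pvStepA (st : List (List Char) × List Char × Bool) (line : List Char) : List (List Char) × List Char × Bool :=
  if PySem.Chars.strip line == pvMarker then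
    if st.2.2 then (st.1 ++ [PySem.Chars.strip st.2.1], line ++ ['\n'], true)
    else (st.1, line ++ ['\n'], true)
  else
    if st.2.2 then (st.1, st.2.1 ++ line ++ ['\n'], st.2.2)
    else st

def split_text_by_general_order (text : String) : List String :=
  let lines := PySem.Chars.splitOn text.toList ['\n']
  let st := lines.foldl pvStepA ([], [], false)
  let chunks := if st.2.2 then st.1 ++ [PySem.Chars.strip st.2.1] else st.1
  chunks.map String.ofList

-- ===== PORT B =====
def split_text_by_general_order_alt (text : String) : List String :=
  let lines := PySem.Chars.splitOn text.toList ['\n']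
  let marks := ((PySem.List.enumerate lines).filter (fun p => PySem.Chars.strip p.2 == pvMarker)).map (·.1)
  (marks.zip (marks.drop 1 ++ [(lines.length : Int)])).map
    (fun p => String.ofList (PySem.Chars.strip
      (PySem.Chars.join ['\n'] (PySem.List.slice lines (some p.1) (some p.2)))))

-- ===== PRECONDITION & SPEC =====
def Spec_split_text_by_general_order (text : String) (out : List String) : Prop := out = split_text_by_general_order_alt text
instance (text : String) (out : List String) : Decidable (Spec_split_text_by_general_order text out) := by unfold Spec_split_text_by_general_order; infer_instance

-- ===== CLAIM (what is proved, stated in full; the proofs are below) =====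
def Claim_equal_split_text_by_general_order : Prop := ∀ (text : String), Dom_split_text_by_general_order text → Spec_split_text_by_general_order text (split_text_by_general_order text)

-- ===== LEMMAS AND PROOFS =====
def pvIsM (l : List Char) : Bool := PySem.Chars.strip l == pvMarker

-- the lines of a chunk, each with its trailing '\n' (how A accumulates them)
def pvCat : List (List Char) → List Char
  | [] => []
  | l :: ls => l ++ '\n' :: pvCat ls

-- A's behaviour from a state inside a GENERAL ORDER section with current chunk c
def pvSegIn (c : List Char) : List (List Char) → List (List Char)
  | [] => [PySem.Chars.strip c]
  | l :: ls => if pvIsM l then PySem.Chars.strip c :: pvSegIn (l ++ ['\n']) ls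
               else pvSegIn (c ++ l ++ ['\n']) ls

-- A's behaviour from the initial (outside) state
def pvSegOut : List (List Char) → List (List Char)
  | [] => []
  | l :: ls => if pvIsM l then pvSegIn (l ++ ['\n']) ls else pvSegOut ls

-- 0-based indices of the marker lines
def pvMarks : List (List Char) → List Nat
  | [] => []
  | l :: ls => if pvIsM l then 0 :: (pvMarks ls).map (· + 1) else (pvMarks ls).map (· + 1)

def pvChunk (lines : List (List Char)) (p : Nat × Nat) : List Char :=
  PySem.Chars.strip (PySem.Chars.join ['\n'] ((lines.drop p.1).take (p.2 - p.1)))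

-- B's computation, over Nat indices
def pvBcore (lines : List (List Char)) : List (List Char) :=
  ((pvMarks lines).zip ((pvMarks lines).drop 1 ++ [lines.length])).map (pvChunk lines)

theorem pv_rstrip_nl (x : List Char) :
    PySem.Chars.rstrip (x ++ ['\n']) = PySem.Chars.rstrip x := by
  simp [PySem.Chars.rstrip, show PySem.Chars.isspace '\n' = true from rfl]

theorem pv_strip_nl (x : List Char) :
    PySem.Chars.strip (x ++ ['\n']) = PySem.Chars.strip x := by
  unfold PySem.Chars.strip PySem.Chars.lstrip
  rw [List.dropWhile_append]
  split
  · next h =>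
      rw [List.isEmpty_iff] at h
      rw [h]
      simp [show PySem.Chars.isspace '\n' = true from rfl]
  · rw [pv_rstrip_nl]

theorem pvCat_eq (l : List Char) (ls : List (List Char)) :
    pvCat (l :: ls) = PySem.Chars.join ['\n'] (l :: ls) ++ ['\n'] := by
  induction ls generalizing l with
  | nil => simp [pvCat, PySem.Chars.join_singleton]
  | cons l' ls ih =>
      rw [show pvCat (l :: l' :: ls) = l ++ '\n' :: pvCat (l' :: ls) from rfl,
        ih l', PySem.Chars.join_cons_cons]
      simp

theorem pv_strip_join (l : List Char) (ls : List (List Char)) :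
    PySem.Chars.strip (PySem.Chars.join ['\n'] (l :: ls)) = PySem.Chars.strip (pvCat (l :: ls)) := by
  rw [pvCat_eq, pv_strip_nl]

theorem pv_enum_marks (lines : List (List Char)) (k : Int) :
    ((PySem.List.enumerate lines k).filter (fun p => pvIsM p.2)).map (·.1)
      = (pvMarks lines).map (fun i : Nat => k + (i : Int)) := by
  induction lines generalizing k with
  | nil => simp [PySem.List.enumerate, pvMarks]
  | cons l ls ih =>
      rw [PySem.List.enumerate_cons]
      by_cases h : pvIsM l
      · simp [pvMarks, h, ih, List.map_map, Function.comp]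
        intro a _
        ring
      · simp [pvMarks, h, ih, List.map_map, Function.comp]
        intro a _
        ring

theorem pvSegIn_no_marks (ls : List (List Char)) (c : List Char) (h : pvMarks ls = []) :
    pvSegIn c ls = [PySem.Chars.strip (c ++ pvCat ls)] := by
  induction ls generalizing c with
  | nil => simp [pvSegIn, pvCat]
  | cons l ls ih =>
      simp only [pvMarks] at h
      by_cases hl : pvIsM l
      · simp [hl] at h
      · simp only [hl, Bool.false_eq_true, ite_false, List.map_eq_nil_iff] at h
        simp [pvSegIn, hl, ih _ h, pvCat, List.append_assoc]

theorem pvSegIn_marks (ls : List (List Char)) (c : List Char) (k : Nat) (ms : List Nat)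
    (h : pvMarks ls = k :: ms) :
    pvSegIn c ls = PySem.Chars.strip (c ++ pvCat (ls.take k)) :: pvSegOut (ls.drop k) := by
  induction ls generalizing c k ms with
  | nil => simp [pvMarks] at h
  | cons l ls ih =>
      by_cases hl : pvIsM l
      · simp only [pvMarks, hl, if_pos] at h
        obtain ⟨h1, -⟩ := List.cons.inj h
        subst h1
        simp [pvSegIn, pvSegOut, hl, pvCat]
      · simp only [pvMarks, hl, Bool.false_eq_true, ite_false] at h
        obtain ⟨k', ms', hm, hk⟩ : ∃ k' ms', pvMarks ls = k' :: ms' ∧ k = k' + 1 := by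
          cases hm : pvMarks ls with
          | nil => rw [hm] at h; simp at h
          | cons a b =>
              rw [hm] at h
              obtain ⟨h1, -⟩ := List.cons.inj h
              exact ⟨a, b, rfl, h1.symm⟩
        subst hk
        simp [pvSegIn, hl, ih _ _ _ hm, pvCat, List.append_assoc, List.take_succ_cons,
          List.drop_succ_cons]

theorem pvSegOut_skip (ls : List (List Char)) (k : Nat) (ms : List Nat)
    (h : pvMarks ls = k :: ms) :
    pvSegOut ls = pvSegOut (ls.drop k) := by
  induction ls generalizing k ms with
  | nil => simp [pvMarks] at h
  | cons l ls ih =>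
      by_cases hl : pvIsM l
      · simp only [pvMarks, hl, if_pos] at h
        obtain ⟨h1, -⟩ := List.cons.inj h
        subst h1
        simp
      · simp only [pvMarks, hl, Bool.false_eq_true, ite_false] at h
        obtain ⟨k', ms', hm, hk⟩ : ∃ k' ms', pvMarks ls = k' :: ms' ∧ k = k' + 1 := by
          cases hm : pvMarks ls with
          | nil => rw [hm] at h; simp at h
          | cons a b =>
              rw [hm] at h
              obtain ⟨h1, -⟩ := List.cons.inj h
              exact ⟨a, b, rfl, h1.symm⟩
        subst hk
        simp [pvSegOut, hl, ih _ _ hm, List.drop_succ_cons]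

theorem pvChunk_cons (l : List Char) (ls : List (List Char)) (a b : Nat) :
    pvChunk (l :: ls) (a + 1, b + 1) = pvChunk ls (a, b) := by
  simp [pvChunk, Nat.succ_sub_succ, List.drop_succ_cons]

theorem pv_shift (m : List Nat) (l : List Char) (ls : List (List Char)) :
    ((m.map (· + 1)).zip ((m.map (· + 1)).drop 1 ++ [ls.length + 1])).map (pvChunk (l :: ls))
      = (m.zip (m.drop 1 ++ [ls.length])).map (pvChunk ls) := by
  rw [show ((m.map (· + 1)).drop 1 = (m.drop 1).map (· + 1)) from (List.map_drop).symm,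
     show ([ls.length + 1] : List Nat) = [ls.length].map (· + 1) from rfl,
     ← List.map_append, List.zip_map, List.map_map]
  apply List.map_congr_left
  intro p _
  cases p with
  | mk a b => exact pvChunk_cons l ls a b

theorem pvBcore_eq_segOut (lines : List (List Char)) :
    pvBcore lines = pvSegOut lines := by
  induction lines with
  | nil => rfl
  | cons l ls ih =>
      by_cases hl : pvIsM l
      · cases hm : pvMarks ls with
        | nil =>
            have h1 : pvBcore (l :: ls) = [pvChunk (l :: ls) (0, ls.length + 1)] := by
              simp [pvBcore, pvMarks, hl, hm]
            have h2 : pvChunk (l :: ls) (0, ls.length + 1)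
                = PySem.Chars.strip ((l ++ ['\n']) ++ pvCat ls) := by
              simp only [pvChunk, List.drop_zero, Nat.sub_zero]
              rw [List.take_of_length_le (by simp), pv_strip_join]
              simp [pvCat, List.append_assoc]
            rw [h1, h2]
            simp [pvSegOut, hl, pvSegIn_no_marks ls _ hm]
        | cons k ms =>
            have h1 : pvBcore (l :: ls) = pvChunk (l :: ls) (0, k + 1) :: pvBcore ls := by
              simp only [pvBcore, pvMarks, hl, if_pos, hm, List.map_cons, List.length_cons,
                List.drop_succ_cons, List.drop_zero]
              rw [List.cons_append, List.zip_cons_cons, List.map_cons]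
              congr 1
              have := pv_shift (k :: ms) l ls
              simp only [List.map_cons, List.drop_succ_cons, List.drop_zero] at this
              rw [this]
            have h2 : pvChunk (l :: ls) (0, k + 1)
                = PySem.Chars.strip ((l ++ ['\n']) ++ pvCat (ls.take k)) := by
              simp only [pvChunk, List.drop_zero, Nat.sub_zero, List.take_succ_cons]
              rw [pv_strip_join]
              simp [pvCat, List.append_assoc]
            rw [h1, h2, ih]
            simp only [pvSegOut, hl, if_pos]
            rw [pvSegIn_marks ls _ k ms hm, pvSegOut_skip ls k ms hm]
      · have h1 : pvBcore (l :: ls) = pvBcore ls := by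
          simp only [pvBcore, pvMarks, hl, Bool.false_eq_true, ite_false, List.length_cons]
          exact pv_shift (pvMarks ls) l ls
        rw [h1, ih]
        simp [pvSegOut, hl]

def pvFin (st : List (List Char) × List Char × Bool) : List (List Char) :=
  if st.2.2 then st.1 ++ [PySem.Chars.strip st.2.1] else st.1

theorem pv_foldl_inside (ls : List (List Char)) (chunks : List (List Char)) (c : List Char) :
    pvFin (List.foldl pvStepA (chunks, c, true) ls) = chunks ++ pvSegIn c ls := by
  induction ls generalizing chunks c with
  | nil => simp [pvFin, pvSegIn]
  | cons l ls ih =>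
      rw [List.foldl_cons]
      by_cases hl : pvIsM l
      · have hs : pvStepA (chunks, c, true) l
            = (chunks ++ [PySem.Chars.strip c], l ++ ['\n'], true) := by
          simp [pvStepA, show (PySem.Chars.strip l == pvMarker) = true from hl]
        rw [hs, ih]
        simp [pvSegIn, hl, List.append_assoc]
      · have hs : pvStepA (chunks, c, true) l = (chunks, c ++ l ++ ['\n'], true) := by
          simp [pvStepA, show (PySem.Chars.strip l == pvMarker) = false by simpa [pvIsM] using hl]
        rw [hs, ih]
        simp [pvSegIn, hl, List.append_assoc]

theorem pv_foldl_outside (ls : List (List Char)) (chunks : List (List Char)) (c : List Char) :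
    pvFin (List.foldl pvStepA (chunks, c, false) ls) = chunks ++ pvSegOut ls := by
  induction ls with
  | nil => simp [pvFin, pvSegOut]
  | cons l ls ih =>
      rw [List.foldl_cons]
      by_cases hl : pvIsM l
      · have hs : pvStepA (chunks, c, false) l = (chunks, l ++ ['\n'], true) := by
          simp [pvStepA, show (PySem.Chars.strip l == pvMarker) = true from hl]
        rw [hs, pv_foldl_inside]
        simp [pvSegOut, hl]
      · have hs : pvStepA (chunks, c, false) l = (chunks, c, false) := by
          simp [pvStepA, show (PySem.Chars.strip l == pvMarker) = false by simpa [pvIsM] using hl]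
        rw [hs, ih]
        simp [pvSegOut, hl]

theorem pvA_eq (text : String) :
    split_text_by_general_order text
      = (pvSegOut (PySem.Chars.splitOn text.toList ['\n'])).map String.ofList := by
  rw [show split_text_by_general_order text
      = (pvFin (List.foldl pvStepA ([], [], false)
          (PySem.Chars.splitOn text.toList ['\n']))).map String.ofList from rfl,
    pv_foldl_outside]
  rw [List.nil_append]

theorem pvB_eq (text : String) :
    split_text_by_general_order_alt text
      = (pvBcore (PySem.Chars.splitOn text.toList ['\n'])).map String.ofList := by
  simp only [split_text_by_general_order_alt]
  rw [show (fun p : Int × List Char => PySem.Chars.strip p.2 == pvMarker)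
      = (fun p : Int × List Char => pvIsM p.2) from rfl,
    pv_enum_marks _ 0]
  simp only [zero_add, pvBcore]
  rw [show (fun i : Nat => (i : Int)) = (Nat.cast : Nat → Int) from rfl,
    ← List.map_drop,
    show [((PySem.Chars.splitOn text.toList ['\n']).length : Int)]
      = ([(PySem.Chars.splitOn text.toList ['\n']).length].map (Nat.cast : Nat → Int)) from rfl,
    ← List.map_append, List.zip_map, List.map_map, List.map_map]
  apply List.map_congr_left
  intro p _
  cases p with
  | mk a b =>
      simp [pvChunk, PySem.List.slice_natCast, Function.comp]

-- ===== VERDICT (by name: the statement is the Claim_ definition above) =====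
theorem split_text_by_general_order_spec : Claim_equal_split_text_by_general_order := by
  intro text _
  unfold Spec_split_text_by_general_order
  rw [pvA_eq, pvB_eq, pvBcore_eq_segOut]
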